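-- pv_equiv track=rewrite | github.com/thorsheim/email-security-world-requirements | scripts/generate_readme_table.py | best_req_per_standard
-- ===== SOURCE A (Python) =====
-- STATUS_PRIORITY = {
--     "mandatory": 4,
--     "recommended": 3,
--     "informational": 2,
--     "none": 1,
--     "unknown": 0,
-- }
--
-- def best_req_per_standard(requirements):
--     """For each standard, return the single requirement entry with the highest status.
--     When two authorities cover the same standard, the highest status wins."""
--     groups = {}
--     for req in requirements:
--         std = req.get("standard")
--         if not std:
--             continue
--         if std not in groups:
--             groups[std] = req
--         else:
--             existing_priority = STATUS_PRIORITY.get(groups[std].get("status", "unknown"), 0)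
--             new_priority = STATUS_PRIORITY.get(req.get("status", "unknown"), 0)
--             if new_priority > existing_priority:
--                 groups[std] = req
--     return groups
-- ===== SOURCE B (Python) =====
-- STATUS_PRIORITY = {
--     "mandatory": 4,
--     "recommended": 3,
--     "informational": 2,
--     "none": 1,
--     "unknown": 0,
-- }
--
-- def _prio(req):
--     return STATUS_PRIORITY.get(req.get("status", "unknown"), 0)
--
-- def best_req_per_standard(requirements):
--     """Stage 1: flatten to (standard, req) pairs and drop falsy standards.
--     Stage 2: list the distinct standards in first-seen order.
--     Stage 3: for each standard, an explicit argmax scan over the pairs picks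
--     the first requirement with maximal status priority."""
--     kept = [(r.get("standard", ""), r) for r in requirements]
--     kept = [(s, r) for (s, r) in kept if s]
--     stds = list(dict.fromkeys(s for (s, r) in kept))
--     out = {}
--     for std in stds:
--         best, bp = None, -1
--         for s, r in kept:
--             if s == std and _prio(r) > bp:
--                 best, bp = r, _prio(r)
--         out[std] = best
--     return out
-- ===== Notes on version B (the rewrite author's own statement) =====
-- stated objective: alternative
-- what changed: B replaces A's single-pass dict with an inline running-best update by three staged passes: flatten to (standard, req) pairs, dedup the standards in first-seen order, then for each standard an explicit argmax scan over the pairs picks the first requirement of maximal status priority.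
import Mathlib
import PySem

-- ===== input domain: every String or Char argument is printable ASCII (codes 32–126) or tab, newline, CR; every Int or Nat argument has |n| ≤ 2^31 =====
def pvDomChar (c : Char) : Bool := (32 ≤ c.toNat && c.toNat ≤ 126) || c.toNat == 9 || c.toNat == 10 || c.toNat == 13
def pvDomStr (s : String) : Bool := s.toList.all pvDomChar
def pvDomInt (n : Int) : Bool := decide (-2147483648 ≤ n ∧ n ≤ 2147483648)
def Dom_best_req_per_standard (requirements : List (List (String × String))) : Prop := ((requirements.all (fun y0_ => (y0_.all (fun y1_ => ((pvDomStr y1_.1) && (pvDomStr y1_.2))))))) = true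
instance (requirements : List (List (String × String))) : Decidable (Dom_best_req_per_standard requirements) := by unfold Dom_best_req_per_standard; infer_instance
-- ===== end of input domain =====

-- B trades A's single-pass running-best dict for three staged passes
-- (flatten to (standard, req) pairs → dedup standards → per-standard argmax scan);
-- same results, different decomposition (objective: alternative).

-- STATUS_PRIORITY (shared module constant)
def statusPriority : PySem.Dict String Int :=
  PySem.Dict.ofList [("mandatory", 4), ("recommended", 3), ("informational", 2), ("none", 1), ("unknown", 0)]

-- ===== PORT A =====
-- loop body of A: running best per standard, strict '>' replaces
def stepA (groups : PySem.Dict String (List (String × String))) (req : List (String × String)) :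
    PySem.Dict String (List (String × String)) :=
  match (PySem.Dict.mk req).get? "standard" with
  | none => groups                                   -- std is None
  | some std =>
    if std = "" then groups                          -- falsy string
    else
      match groups.get? std with
      | none => groups.insert std req                -- std not in groups
      | some existing =>
        if statusPriority.getD ((PySem.Dict.mk existing).getD "status" "unknown") 0 <
           statusPriority.getD ((PySem.Dict.mk req).getD "status" "unknown") 0
        then groups.insert std req else groups

def best_req_per_standard (requirements : List (List (String × String))) : List (String × List (String × String)) :=
  (requirements.foldl stepA PySem.Dict.empty).items

-- ===== PORT B =====
-- B's helper _prio(req)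
def prioB (req : List (String × String)) : Int :=
  statusPriority.getD ((PySem.Dict.mk req).getD "status" "unknown") 0

-- stage 1: kept = [(r.get("standard",""), r) ...] filtered by truthy standard
def keptOf (requirements : List (List (String × String))) : List (String × List (String × String)) :=
  (requirements.map (fun r => ((PySem.Dict.mk r).getD "standard" "", r))).filter (fun p => p.1 ≠ "")

-- stage 3 inner loop: best, bp = None, -1; scan all pairs matching std
def scanBest (kept : List (String × List (String × String))) (std : String) :
    Option (List (String × String)) × Int :=
  kept.foldl (fun acc p => if p.1 = std ∧ acc.2 < prioB p.2 then (some p.2, prioB p.2) else acc)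
    (none, -1)

def best_req_per_standard_alt (requirements : List (List (String × String))) : List (String × List (String × String)) :=
  let kept := keptOf requirements
  let stds := PySem.List.dedup (kept.map Prod.fst)        -- stage 2: distinct standards, first-seen order
  -- out[std] = best  (best is never None here; .getD [] only totalises the Option)
  (stds.foldl (fun out std => out.insert std ((scanBest kept std).1.getD [])) PySem.Dict.empty).items

-- ===== PRECONDITION & SPEC =====
def Spec_best_req_per_standard (requirements : List (List (String × String))) (out : List (String × List (String × String))) : Prop := out = best_req_per_standard_alt requirements
instance (requirements : List (List (String × String))) (out : List (String × List (String × String))) : Decidable (Spec_best_req_per_standard requirements out) := by unfold Spec_best_req_per_standard; infer_instance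

-- ===== CLAIM (what is proved, stated in full; the proofs are below) =====
def Claim_equal_best_req_per_standard : Prop := ∀ (requirements : List (List (String × String))), Dom_best_req_per_standard requirements → Spec_best_req_per_standard requirements (best_req_per_standard requirements)

-- ===== LEMMAS AND PROOFS =====

theorem prioB_nonneg (r : List (String × String)) : 0 ≤ prioB r := by
  unfold prioB
  rw [PySem.Dict.getD_eq_get?_getD]
  rcases h : statusPriority.get? ((PySem.Dict.mk r).getD "status" "unknown") with _ | v
  · simp
  · have hm := PySem.Dict.mem_items_of_get?_eq_some (d := statusPriority) h
    have hit : statusPriority.items =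
        [("mandatory", 4), ("recommended", 3), ("informational", 2), ("none", 1), ("unknown", 0)] := rfl
    rw [hit] at hm
    -- the value is one of the five literals
    simp only [List.mem_cons, List.not_mem_nil, or_false, Prod.mk.injEq] at hm
    rcases hm with ⟨_, rfl⟩ | ⟨_, rfl⟩ | ⟨_, rfl⟩ | ⟨_, rfl⟩ | ⟨_, rfl⟩ <;> norm_num

-- the scan-state invariant: the second component is -1 with no best yet, else the best's priority
def InvScan (acc : Option (List (String × String)) × Int) : Prop :=
  acc = (none, -1) ∨ ∃ m, acc.1 = some m ∧ acc.2 = prioB m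

theorem scan_core (kept : List (String × List (String × String))) (std : String)
    (acc : Option (List (String × String)) × Int) (h : InvScan acc) :
    InvScan (kept.foldl (fun acc p => if p.1 = std ∧ acc.2 < prioB p.2 then (some p.2, prioB p.2) else acc) acc) ∧
    (std ∉ kept.map Prod.fst →
      kept.foldl (fun acc p => if p.1 = std ∧ acc.2 < prioB p.2 then (some p.2, prioB p.2) else acc) acc = acc) ∧
    (std ∈ kept.map Prod.fst ∨ acc.1.isSome →
      (kept.foldl (fun acc p => if p.1 = std ∧ acc.2 < prioB p.2 then (some p.2, prioB p.2) else acc) acc).1.isSome) := by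
  induction kept generalizing acc with
  | nil =>
    refine ⟨h, fun _ => rfl, fun hm => ?_⟩
    rcases hm with hm | hm
    · simp at hm
    · exact hm
  | cons p t ih =>
    by_cases hc : p.1 = std ∧ acc.2 < prioB p.2
    · have hstep : (if p.1 = std ∧ acc.2 < prioB p.2 then (some p.2, prioB p.2) else acc) = (some p.2, prioB p.2) := if_pos hc
      have h' : InvScan ((some p.2, prioB p.2) : Option (List (String × String)) × Int) := Or.inr ⟨p.2, rfl, rfl⟩
      obtain ⟨i1, i2, i3⟩ := ih _ h'
      refine ⟨by simpa [hstep] using i1, ?_, ?_⟩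
      · intro hni
        exact absurd (by exact List.mem_map.2 ⟨p, List.mem_cons_self, hc.1⟩) hni
      · intro _
        simp only [List.foldl_cons, hstep]
        exact i3 (Or.inr (by simp))
    · have hstep : (if p.1 = std ∧ acc.2 < prioB p.2 then (some p.2, prioB p.2) else acc) = acc := if_neg hc
      obtain ⟨i1, i2, i3⟩ := ih _ h
      refine ⟨by simpa [hstep] using i1, ?_, ?_⟩
      · intro hni
        simp only [List.foldl_cons, hstep]
        exact i2 (fun hm => hni (by simp [hm]))
      · intro hm
        simp only [List.foldl_cons, hstep]
        apply i3
        rcases hm with hm | hm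
        · rcases List.mem_map.1 hm with ⟨q, hq, hq1⟩
          rcases List.mem_cons.1 hq with rfl | hq
          · -- p.1 = std but condition failed: acc.2 ≥ prioB p.2; split on acc
            rcases h with rfl | ⟨m, hm1, _⟩
            · exfalso
              exact hc ⟨hq1, lt_of_lt_of_le (by norm_num) (prioB_nonneg q.2)⟩
            · exact Or.inr (by simp [hm1])
          · exact Or.inl (List.mem_map.2 ⟨q, hq, hq1⟩)
        · exact Or.inr hm

-- core facts in usable form
theorem scan_not_mem (kept : List (String × List (String × String))) (std : String)
    (h : std ∉ kept.map Prod.fst) : scanBest kept std = (none, -1) :=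
  (scan_core kept std (none, -1) (Or.inl rfl)).2.1 h

theorem scan_snd (kept : List (String × List (String × String))) (std : String) :
    scanBest kept std = (none, -1) ∨
      ∃ m, (scanBest kept std).1 = some m ∧ (scanBest kept std).2 = prioB m :=
  (scan_core kept std (none, -1) (Or.inl rfl)).1

theorem scan_mem_isSome (kept : List (String × List (String × String))) (std : String)
    (h : std ∈ kept.map Prod.fst) : (scanBest kept std).1.isSome :=
  (scan_core kept std (none, -1) (Or.inl rfl)).2.2 (Or.inl h)

-- the winner each group gets (B's out[std] value)
def bestFor (kept : List (String × List (String × String))) (std : String) : List (String × String) :=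
  (scanBest kept std).1.getD []

theorem scan_append_singleton (kept : List (String × List (String × String)))
    (q : String × List (String × String)) (std : String) :
    scanBest (kept ++ [q]) std =
      if q.1 = std ∧ (scanBest kept std).2 < prioB q.2 then (some q.2, prioB q.2)
      else scanBest kept std := by
  simp only [scanBest, List.foldl_append, List.foldl_cons, List.foldl_nil]

theorem bestFor_append_of_ne (kept : List (String × List (String × String)))
    (q : String × List (String × String)) (std : String) (h : q.1 ≠ std) :
    bestFor (kept ++ [q]) std = bestFor kept std := by
  unfold bestFor
  rw [scan_append_singleton, if_neg (fun hc => h hc.1)]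

-- dedup over an appended element
theorem dedup_append_singleton {α : Type} [BEq α] [LawfulBEq α] (xs : List α) (x : α) :
    PySem.List.dedup (xs ++ [x]) =
      if x ∈ xs then PySem.List.dedup xs else PySem.List.dedup xs ++ [x] := by
  simp only [PySem.List.dedup_eq_ofList, PySem.Set.ofList_eq_foldl, List.foldl_append,
    List.foldl_cons, List.foldl_nil]
  rw [← PySem.Set.ofList_eq_foldl]
  simp only [PySem.Set.add]
  by_cases hx : x ∈ xs
  · rw [if_pos (by simpa [PySem.Set.contains] using (PySem.Set.mem_ofList xs x).2 hx), if_pos hx]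
  · rw [if_neg (by simpa [PySem.Set.contains] using fun hm => hx ((PySem.Set.mem_ofList xs x).1 hm)), if_neg hx]

theorem keptOf_append_singleton (l : List (List (String × String))) (r : List (String × String)) :
    keptOf (l ++ [r]) =
      keptOf l ++ (if ((PySem.Dict.mk r).getD "standard" "") ≠ "" then [((PySem.Dict.mk r).getD "standard" "", r)] else []) := by
  simp only [keptOf, List.map_append, List.filter_append, List.map_cons, List.map_nil]
  congr 1
  split <;> simp_all

theorem keys_of_AItems (l : List (List (String × String)))
    (h : (l.foldl stepA PySem.Dict.empty).items =
      (PySem.List.dedup ((keptOf l).map Prod.fst)).map (fun std => (std, bestFor (keptOf l) std))) :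
    (l.foldl stepA PySem.Dict.empty).keys = PySem.List.dedup ((keptOf l).map Prod.fst) := by
  simp only [PySem.Dict.keys, h, List.map_map]
  rw [show ((fun x => x.1) ∘ fun std => (std, bestFor (keptOf l) std)) = id from rfl, List.map_id]

theorem invariant_step (l : List (List (String × String))) (r : List (String × String))
    (h : (l.foldl stepA PySem.Dict.empty).items =
      (PySem.List.dedup ((keptOf l).map Prod.fst)).map (fun std => (std, bestFor (keptOf l) std))) :
    ((l ++ [r]).foldl stepA PySem.Dict.empty).items =
      (PySem.List.dedup ((keptOf (l ++ [r])).map Prod.fst)).map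
        (fun std => (std, bestFor (keptOf (l ++ [r])) std)) := by
  have hkeys := keys_of_AItems l h
  have hnodA : (l.foldl stepA PySem.Dict.empty).keys.Nodup := by
    rw [hkeys]; exact PySem.List.nodup_dedup _
  set D := l.foldl stepA PySem.Dict.empty with hD
  set kept := keptOf l with hk
  rw [List.foldl_append, List.foldl_cons, List.foldl_nil, keptOf_append_singleton, ← hD, ← hk]
  -- relate A's get? "standard" with B's getD "standard" ""
  unfold stepA
  cases hstd : (PySem.Dict.mk r).get? "standard" with
  | none =>
    have hgd : (PySem.Dict.mk r).getD "standard" "" = "" := by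
      rw [PySem.Dict.getD_eq_get?_getD, hstd]; rfl
    simpa [hgd] using h
  | some std =>
    have hgd : (PySem.Dict.mk r).getD "standard" "" = std := by
      rw [PySem.Dict.getD_eq_get?_getD, hstd]; rfl
    dsimp only
    by_cases hemp : std = ""
    · simpa [hemp, hgd] using h
    rw [if_neg hemp]
    rw [hgd, if_pos hemp]
    set q : String × List (String × String) := (std, r) with hq
    -- new kept = kept ++ [q]
    have hmapfst : (kept ++ [q]).map Prod.fst = kept.map Prod.fst ++ [std] := by simp [hq]
    cases hB : D.get? std with
    | none =>
      -- std unseen: s ∉ keys = dedup (kept.map fst) hence ∉ kept.map fst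
      have hnotk : std ∉ D.keys := by
        rw [PySem.Dict.get?_eq_none_iff_not_mem_keys] at hB
        exact hB
      have hnmem : std ∉ kept.map Prod.fst := by
        rw [hkeys] at hnotk
        intro hm
        exact hnotk (by simpa [PySem.List.mem_dedup] using hm)
      have hcont : D.contains std = false := by
        rw [← PySem.Dict.get?_eq_none_iff_contains]; exact hB
      rw [PySem.Dict.items_insert_of_not_contains _ _ hcont, h]
      rw [hmapfst, dedup_append_singleton, if_neg hnmem, List.map_append]
      congr 1
      · apply List.map_congr_left
        intro std' hstd'
        have hne : std' ≠ std := fun he =>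
          hnmem (he ▸ (by simpa [PySem.List.mem_dedup] using hstd'))
        rw [bestFor_append_of_ne _ _ _ (by simpa [hq] using hne.symm)]
      · -- bestFor (kept ++ [q]) std = r
        have hscan : scanBest kept std = (none, -1) := scan_not_mem kept std hnmem
        simp only [List.map_cons, List.map_nil, bestFor, scan_append_singleton, hscan, hq]
        rw [if_pos (And.intro (by trivial) (lt_of_lt_of_le (by norm_num) (prioB_nonneg r)))]
        rfl
    | some existing =>
      -- std seen before: existing = bestFor kept std = some m with recorded priority
      have hmemk : std ∈ kept.map Prod.fst := by
        have hmk : std ∈ D.keys := by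
          by_contra hn
          have := (PySem.Dict.get?_eq_none_iff_not_mem_keys (d := D) (k := std)).2 hn
          simp [hB] at this
        rw [hkeys, PySem.List.mem_dedup] at hmk
        exact hmk
      obtain ⟨m, hm1, hm2⟩ : ∃ m, (scanBest kept std).1 = some m ∧ (scanBest kept std).2 = prioB m := by
        rcases scan_snd kept std with hz | hs
        · have hsome := scan_mem_isSome kept std hmemk
          rw [hz] at hsome
          simp at hsome
        · exact hs
      have hbf : bestFor kept std = m := by simp [bestFor, hm1]
      have hex : existing = m := by
        have hmem : (std, bestFor kept std) ∈ D.items := by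
          rw [h]
          exact List.mem_map.2 ⟨std, by simpa [PySem.List.mem_dedup] using hmemk, rfl⟩
        have h2 := PySem.Dict.get?_of_mem_items D hmem hnodA
        rw [hB] at h2
        exact (Option.some.inj h2).trans hbf
      have hcont : D.contains std = true := by
        by_contra hcth
        have : D.get? std = none :=
          (PySem.Dict.get?_eq_none_iff_contains D std).2 (by simpa using hcth)
        simp [hB] at this
      have hmapnew : PySem.List.dedup ((kept ++ [q]).map Prod.fst) = PySem.List.dedup (kept.map Prod.fst) := by
        rw [hmapfst, dedup_append_singleton, if_pos hmemk]
      have hbnew : bestFor (kept ++ [q]) std = if prioB m < prioB r then r else m := by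
        simp only [bestFor, scan_append_singleton, hm2, hq]
        by_cases hlt : prioB m < prioB r
        · rw [if_pos (And.intro (by trivial) hlt), if_pos hlt]; rfl
        · rw [if_neg (fun hc => hlt hc.2), if_neg hlt, hm1]; rfl
      have hcongr_ne : ∀ std' ∈ PySem.List.dedup (kept.map Prod.fst), std' ≠ std →
          bestFor (kept ++ [q]) std' = bestFor kept std' := fun std' _ hne =>
        bestFor_append_of_ne _ _ _ (by simpa [hq] using fun he => hne he.symm)
      rw [hmapnew]
      dsimp only
      by_cases hlt : statusPriority.getD ((PySem.Dict.mk existing).getD "status" "unknown") 0 <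
          statusPriority.getD ((PySem.Dict.mk r).getD "status" "unknown") 0
      · have hlt' : prioB existing < prioB r := hlt
        rw [if_pos hlt, PySem.Dict.items_insert_of_contains _ _ hcont, h, List.map_map]
        apply List.map_congr_left
        intro std' hstd'
        by_cases hps : std' = std
        · subst hps
          simp only [Function.comp_apply, beq_self_eq_true, if_pos]
          rw [hbnew, if_pos (hex ▸ hlt')]
        · simp only [Function.comp_apply]
          rw [if_neg (by simpa using hps), hcongr_ne std' hstd' hps]
      · have hlt' : ¬ prioB existing < prioB r := hlt
        rw [if_neg hlt, h]
        symm
        apply List.map_congr_left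
        intro std' hstd'
        by_cases hps : std' = std
        · subst hps
          rw [hbnew, if_neg (hex ▸ hlt'), hbf]
        · rw [hcongr_ne std' hstd' hps]

theorem invariant_all (l : List (List (String × String))) :
    (l.foldl stepA PySem.Dict.empty).items =
      (PySem.List.dedup ((keptOf l).map Prod.fst)).map (fun std => (std, bestFor (keptOf l) std)) := by
  induction l using List.reverseRecOn with
  | nil => simp [keptOf, PySem.Dict.empty, PySem.List.dedup]
  | append_singleton t r ih => exact invariant_step t r ih

-- B's final dict over fresh distinct keys is just the map
theorem alt_eq_map (requirements : List (List (String × String))) :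
    best_req_per_standard_alt requirements =
      (PySem.List.dedup ((keptOf requirements).map Prod.fst)).map
        (fun std => (std, bestFor (keptOf requirements) std)) := by
  unfold best_req_per_standard_alt
  have hfresh : ∀ a ∈ PySem.List.dedup (List.map Prod.fst (keptOf requirements)),
      (PySem.Dict.empty : PySem.Dict String (List (String × String))).contains a = false := by
    intro a _
    simp [pysem]
  have hnd : (List.map (fun s => s) (PySem.List.dedup (List.map Prod.fst (keptOf requirements)))).Nodup := by
    simp
  have hfold := PySem.Dict.items_foldl_insert_fresh
    (PySem.List.dedup (List.map Prod.fst (keptOf requirements))) (fun s => s)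
    (fun std => (scanBest (keptOf requirements) std).1.getD []) PySem.Dict.empty hfresh hnd
  exact hfold.trans (by simp [bestFor, PySem.Dict.empty])

-- ===== VERDICT (by name: the statement is the Claim_ definition above) =====
theorem best_req_per_standard_spec : Claim_equal_best_req_per_standard := by
  intro requirements _
  unfold Spec_best_req_per_standard best_req_per_standard
  rw [alt_eq_map]
  exact invariant_all requirements
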